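-- pv_equiv track=rewrite | github.com/Bardhitoo/CSCI.603-Computational-Problem-Solving | Week 13/Prakhar/icemaze-stu.py | is_left
-- ===== SOURCE A (Python) =====
-- ROCK = "*"
--
-- def is_left(row, col, maze):
--     """
--     Finds the left-most value possible value where a person at coordinate x,y(row ,column)
--     can go
--
--     :param row:     row coordinate of the node in the graph
--     :param col:     column coordinate of the node in the graph
--     :param maze:    the matrix of the maze with the data
--
--     :return:
--     None if top movement is not possible
--     Tuple(y,x) - (column no, row no) is top movement is possible
--     """
--
--     check_maze = maze[row]
--     left = None
--     for items in range(len(check_maze) - 1, -1, -1):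
--
--         if items < col:
--             if check_maze[items] == ".":
--                 left = items
--             if check_maze[items] == ROCK:
--                 break
--
--     if left is not None:
--         return left, row
--     else:
--         return None
-- ===== SOURCE B (Python) =====
-- ROCK = "*"
--
-- def is_left(row, col, maze):
--     # Staged: slice the reachable window, find the start just past the last rock,
--     # then find the first open cell from there.
--     window = maze[row][:max(col, 0)]
--     start = 0
--     for i, c in enumerate(window):
--         if c == ROCK:
--             start = i + 1
--     for i in range(start, len(window)):
--         if window[i] == ".":
--             return (i, row)
--     return None
-- ===== Notes on version B (the rewrite author's own statement) =====
-- stated objective: alternative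
-- what changed: Replaces A's single backward scan (set-on-dot, break-on-rock) with staged passes: slice the reachable window maze[row][:max(col,0)], one enumerate pass to find the position just past the last rock, then a search for the first '.' at or after that position.
import Mathlib
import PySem

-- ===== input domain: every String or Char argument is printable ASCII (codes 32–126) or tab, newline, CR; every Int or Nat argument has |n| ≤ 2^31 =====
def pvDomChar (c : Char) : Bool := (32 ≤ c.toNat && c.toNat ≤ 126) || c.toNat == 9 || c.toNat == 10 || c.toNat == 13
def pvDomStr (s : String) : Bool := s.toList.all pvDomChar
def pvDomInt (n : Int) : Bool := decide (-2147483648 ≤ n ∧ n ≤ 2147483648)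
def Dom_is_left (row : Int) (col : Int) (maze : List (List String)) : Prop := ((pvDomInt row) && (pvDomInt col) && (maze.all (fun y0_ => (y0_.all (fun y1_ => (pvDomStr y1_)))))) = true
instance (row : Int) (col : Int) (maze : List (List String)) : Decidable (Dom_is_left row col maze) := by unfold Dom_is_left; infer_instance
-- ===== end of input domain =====

-- B replaces A's backward scan (set-on-dot, break-on-rock) by staged passes: slice the
-- reachable window, locate the end of the last rock, then find the first open cell after it
-- (objective: alternative decomposition, same cost).

-- ===== PORT A =====
-- the for-loop 'for items in range(len(check_maze)-1, -1, -1)' as a count-down recursion: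
-- 'aLoop r col k left' runs items = k-1, k-2, …, 0; 'break' returns the current left.
def aLoop (r : List String) (col : Int) : Nat → Option Int → Option Int
  | 0, left => left
  | k+1, left =>
    if (k : Int) < col then
      let c := (PySem.List.pyGet? r (k : Int)).getD ""
      let left' := if c = "." then some (k : Int) else left
      if c = "*" then left' else aLoop r col k left'
    else aLoop r col k left

def is_left (row : Int) (col : Int) (maze : List (List String)) : Option (Int × Int) :=
  match PySem.List.pyGet? maze row with
  | none => none   -- Python raises IndexError here; excluded by Pre_is_left
  | some check_maze =>
    match aLoop check_maze col check_maze.length none with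
    | some l => some (l, row)
    | none => none

-- ===== PORT B =====
-- 'start = 0; for i, c in enumerate(window): if c == ROCK: start = i + 1'
def lastRockEnd (window : List String) : Int :=
  (PySem.List.enumerate window 0).foldl (fun s p => if p.2 = "*" then p.1 + 1 else s) 0

-- 'for i, c in enumerate(window): if i >= start and c == ".": return (i, row)' — first hit
def findOpen (window : List String) (start : Int) : Option (Int × String) :=
  (PySem.List.enumerate window 0).find? (fun p => decide (start ≤ p.1) && decide (p.2 = "."))

def is_left_alt (row : Int) (col : Int) (maze : List (List String)) : Option (Int × Int) :=
  match PySem.List.pyGet? maze row with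
  | none => none   -- Python raises IndexError here; excluded by Pre_is_left
  | some chk =>
    let window := PySem.List.slice chk none (some (max col 0))   -- maze[row][:max(col, 0)]
    match findOpen window (lastRockEnd window) with
    | some p => some (p.1, row)
    | none => none

-- ===== PRECONDITION & SPEC =====
-- Pre_ excludes exactly the inputs where maze[row] raises IndexError (both A and B raise there).
def Pre_is_left (row : Int) (col : Int) (maze : List (List String)) : Prop :=
  (PySem.List.pyGet? maze row).isSome = true
instance (row : Int) (col : Int) (maze : List (List String)) : Decidable (Pre_is_left row col maze) := by unfold Pre_is_left; infer_instance

def pvWitness_is_left : Int × Int × List (List String) := (0, 3, [["*", ".", "."]])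

def Spec_is_left (row : Int) (col : Int) (maze : List (List String)) (out : Option (Int × Int)) : Prop := out = is_left_alt row col maze
instance (row : Int) (col : Int) (maze : List (List String)) (out : Option (Int × Int)) : Decidable (Spec_is_left row col maze out) := by unfold Spec_is_left; infer_instance

-- ===== CLAIM (what is proved, stated in full; the proofs are below) =====
def Claim_equal_is_left : Prop := ∀ (row : Int) (col : Int) (maze : List (List String)), Dom_is_left row col maze → Pre_is_left row col maze → Spec_is_left row col maze (is_left row col maze)

-- ===== LEMMAS AND PROOFS =====

-- one forward step of A's loop body at index k (with the i < col guard)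
def stepR (r : List String) (col : Int) (acc : Option Int) (k : Nat) : Option Int :=
  if (k : Int) < col then
    let c := (PySem.List.pyGet? r (k : Int)).getD ""
    if c = "*" then none else if c = "." ∧ acc = none then some (k : Int) else acc
  else acc

-- the same step on the sliced window (no guard)
def stepG (w : List String) (acc : Option Int) (k : Nat) : Option Int :=
  if w.getD k "" = "*" then none
  else if w.getD k "" = "." ∧ acc = none then some (k : Int) else acc

-- A's loop with accumulator acc equals the acc-free run, with acc as fallback
theorem aLoop_acc (r : List String) (col : Int) (k : Nat) (acc : Option Int) :
    aLoop r col k acc = match aLoop r col k none with | some x => some x | none => acc := by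
  induction k generalizing acc with
  | zero => simp [aLoop]
  | succ k ih =>
    simp only [aLoop]
    split
    · set c := (PySem.List.pyGet? r (k : Int)).getD "" with hc
      by_cases h1 : c = "*"
      · simp [h1]
      · simp only [if_neg h1]
        by_cases h2 : c = "."
        · simp only [if_pos h2]
          rw [ih (some (k : Int))]
          cases aLoop r col k none <;> rfl
        · simp only [if_neg h2]
          rw [ih acc]
    · rw [ih acc]

-- A's loop computes the forward fold of stepR
theorem aLoop_foldl (r : List String) (col : Int) (k : Nat) :
    aLoop r col k none = List.foldl (stepR r col) none (List.range k) := by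
  induction k with
  | zero => simp [aLoop]
  | succ k ih =>
    rw [List.range_succ, List.foldl_append]
    simp only [List.foldl_cons, List.foldl_nil, aLoop, stepR]
    split
    · set c := (PySem.List.pyGet? r (k : Int)).getD "" with hc
      by_cases h1 : c = "*"
      · simp [h1]
      · simp only [if_neg h1]
        by_cases h2 : c = "."
        · simp only [if_pos h2]
          rw [aLoop_acc, ih]
          cases List.foldl (stepR r col) none (List.range k) <;> simp [h2]
        · simp only [if_neg h2]
          rw [ih]
          cases hF : List.foldl (stepR r col) none (List.range k) <;> simp [h2]
    · exact ih

-- once the column bound is reached, every remaining step of the fold is a no-op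
theorem foldl_stepR_noop (r : List String) (col : Int) (k : Nat) :
    ∀ (i : Nat) (acc : Option Int), col ≤ (i : Int) →
      List.foldl (stepR r col) acc (List.range' i k) = acc := by
  induction k with
  | zero => intro i acc _; rfl
  | succ k ih =>
    intro i acc h
    rw [List.range'_succ, List.foldl_cons]
    have h1 : ¬ ((i : Int) < col) := by omega
    rw [show stepR r col acc i = acc from by simp [stepR, h1]]
    exact ih (i+1) acc (by push_cast; omega)

-- the guarded fold over the whole row equals the unguarded fold over the sliced window
theorem foldl_stepR_eq_stepG (r : List String) (col : Int) :
    List.foldl (stepR r col) none (List.range r.length)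
      = List.foldl (stepG (r.take (max col 0).toNat)) none
          (List.range (r.take (max col 0).toNat).length) := by
  set m := (max col 0).toNat with hm
  set w := r.take m with hw
  have hwl : w.length = min m r.length := by simp [hw]
  have hcm : col ≤ (m : Int) := by omega
  have hstep : ∀ (acc : Option Int) (i : Nat), i ∈ List.range w.length →
      stepR r col acc i = stepG w acc i := by
    intro acc i hi
    rw [List.mem_range] at hi
    have him : i < m := by omega
    have hir : i < r.length := by omega
    have hcol : (i : Int) < col := by
      have : 0 < m := by omega
      omega
    have hlook : (PySem.List.pyGet? r (i : Int)).getD "" = w.getD i "" := by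
      rw [PySem.List.pyGet?_natCast]
      simp [hw, List.getD, List.getElem?_take, him]
    simp only [stepR, stepG, if_pos hcol, hlook]
  calc List.foldl (stepR r col) none (List.range r.length)
      = List.foldl (stepR r col) none (List.range' 0 w.length ++ List.range' w.length (r.length - w.length)) := by
        congr 1
        rw [List.range_eq_range']
        have h0 : List.range' 0 w.length ++ List.range' (0 + 1 * w.length) (r.length - w.length)
            = List.range' 0 (w.length + (r.length - w.length)) := List.range'_append
        simp only [Nat.one_mul, Nat.zero_add] at h0
        rw [h0]
        congr 1
        omega
    _ = List.foldl (stepR r col) (List.foldl (stepR r col) none (List.range' 0 w.length)) (List.range' w.length (r.length - w.length)) := by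
        rw [List.foldl_append]
    _ = List.foldl (stepR r col) none (List.range w.length) := by
        rcases Nat.lt_or_ge r.length m with h | h
        · have : r.length - w.length = 0 := by omega
          rw [this]
          simp [List.range_eq_range']
        · have hwm : w.length = m := by omega
          rw [foldl_stepR_noop r col _ w.length _ (by rw [hwm]; exact hcm)]
          simp [List.range_eq_range']
    _ = List.foldl (stepG w) none (List.range w.length) :=
        PySem.List.foldl_congr_mem _ _ _ _ hstep

-- the rock-reset position is within bounds
theorem lastRockEnd_bounds (w : List String) :
    0 ≤ lastRockEnd w ∧ lastRockEnd w ≤ (w.length : Int) := by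
  induction w using List.reverseRecOn with
  | nil => simp [lastRockEnd, PySem.List.enumerate]
  | append_singleton w a ih =>
    unfold lastRockEnd at *
    rw [PySem.List.enumerate_append, List.foldl_append]
    simp only [PySem.List.enumerate_cons, PySem.List.enumerate_nil,
      List.foldl_cons, List.foldl_nil, List.length_append, List.length_singleton]
    by_cases h : a = "*" <;> simp [h] <;> push_cast <;> omega

-- the single forward fold equals B's two staged passes
theorem foldl_stepG_eq_twoPass (w : List String) :
    List.foldl (stepG w) none (List.range w.length)
      = (findOpen w (lastRockEnd w)).map (·.1) := by
  induction w using List.reverseRecOn with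
  | nil => simp [findOpen, PySem.List.enumerate]
  | append_singleton w a ih =>
    have hS := lastRockEnd_bounds w
    have hSE : lastRockEnd (w ++ [a]) = if a = "*" then (w.length : Int) + 1 else lastRockEnd w := by
      unfold lastRockEnd
      rw [PySem.List.enumerate_append, List.foldl_append]
      simp [PySem.List.enumerate_cons]
    have hlen : (w ++ [a]).length = w.length + 1 := by simp
    -- unroll the fold: last index first
    rw [hlen, List.range_succ, List.foldl_append, List.foldl_cons, List.foldl_nil]
    -- the fold over the first w.length indices only looks at w
    have hpre : List.foldl (stepG (w ++ [a])) none (List.range w.length)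
        = List.foldl (stepG w) none (List.range w.length) := by
      refine PySem.List.foldl_congr_mem _ _ _ _ ?_
      intro acc i hi
      rw [List.mem_range] at hi
      simp only [stepG, List.getD, List.getElem?_append_left hi]
      rfl
    have hlast : (w ++ [a]).getD w.length "" = a := by
      simp [List.getD]
    -- the find? over the appended enumeration
    unfold findOpen at ih ⊢
    rw [PySem.List.enumerate_append, List.find?_append]
    simp only [PySem.List.enumerate_cons, PySem.List.enumerate_nil]
    rw [hpre, ih]
    by_cases ha : a = "*"
    · -- rock: fold resets to none; start moves past everything
      rw [hSE, if_pos ha]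
      have hnone : (PySem.List.enumerate w 0).find?
          (fun p => decide ((w.length : Int) + 1 ≤ p.1) && decide (p.2 = ".")) = none := by
        rw [List.find?_eq_none]
        intro p hp
        rcases (PySem.List.mem_enumerate_iff _ _ _).1 hp with ⟨k, hk, rfl⟩
        simp only [Bool.and_eq_true, decide_eq_true_eq, not_and]
        intro h
        exfalso
        simp at h
        omega
      rw [hnone]
      have hlt : ¬ ((w.length : Int) + 1 ≤ 0 + (w.length : Int)) := by omega
      simp [stepG, hlast, ha, List.find?, hlt]
    · rw [hSE, if_neg ha]
      cases hF : (PySem.List.enumerate w 0).find?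
          (fun p => decide (lastRockEnd w ≤ p.1) && decide (p.2 = ".")) with
      | some p => simp [stepG, hlast, ha, hF]
      | none =>
        have hle : lastRockEnd w ≤ (w.length : Int) := hS.2
        by_cases hd : a = "."
        · simp [stepG, hlast, ha, hd, hF, List.find?, hle]
        · simp [stepG, hlast, ha, hd, hF, List.find?]

-- the two loop pipelines agree on any row
theorem loops_agree (r : List String) (col : Int) :
    aLoop r col r.length none
      = (findOpen (PySem.List.slice r none (some (max col 0)))
          (lastRockEnd (PySem.List.slice r none (some (max col 0))))).map (·.1) := by
  have hslice : PySem.List.slice r none (some (max col 0)) = r.take (max col 0).toNat :=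
    PySem.List.slice_to r (le_max_right col 0)
  rw [aLoop_foldl, foldl_stepR_eq_stepG, hslice, foldl_stepG_eq_twoPass]

-- ===== VERDICT (by name: the statement is the Claim_ definition above) =====
theorem is_left_spec : Claim_equal_is_left := by
  intro row col maze _ _
  unfold Spec_is_left is_left is_left_alt
  cases PySem.List.pyGet? maze row with
  | none => rfl
  | some chk =>
    simp only
    rw [loops_agree chk col]
    cases findOpen (PySem.List.slice chk none (some (max col 0)))
        (lastRockEnd (PySem.List.slice chk none (some (max col 0)))) <;> rfl
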